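-- pv_equiv track=rewrite | github.com/kwsp/advent-of-code | 2021/day17.py | get_possible_y_fly_through
-- ===== SOURCE A (Python) =====
-- from collections import defaultdict
--
-- def get_possible_y_fly_through(target):
--     y_max = -(min(target[1]) + 1)
--     y_min = min(target[1])
--     possible_y = defaultdict(list)
--     y_target = range(target[1][0], target[1][1] + 1)
--     for y in range(y_min, y_max + 1):
--         for y_last in range(y_min, 0):
--             if y_last >= 0:
--                 continue
--             n_steps = y + 1 - y_last
--             pos = sum(range(y_last, y + 1))
--             if pos in y_target:
--                 possible_y[n_steps].append(y)
--     return possible_y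
-- ===== SOURCE B (Python) =====
-- def _tri(n):
--     # triangular number 1+2+...+n (exact for negative n too)
--     return n * (n + 1) // 2
--
--
-- def get_possible_y_fly_through(target):
--     lo, hi = target[1][0], target[1][1]
--     y_min = min(target[1])
--     # collect every hit (n_steps, y) with a closed-form arithmetic series
--     # instead of summing a range, then group by n_steps in one pass
--     hits = [(y + 1 - y_last, y)
--             for y in range(y_min, -y_min)
--             for y_last in range(y_min, 0)
--             if lo <= (_tri(y) - _tri(y_last - 1) if y_last <= y else 0) <= hi]
--     possible_y = {}
--     for n_steps, y in hits:
--         possible_y.setdefault(n_steps, []).append(y)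
--     return possible_y
-- ===== Notes on version B (the rewrite author's own statement) =====
-- stated objective: faster
-- what changed: Replaced the inner sum(range(y_last, y+1)) re-summation with a closed-form triangular-number difference and split the work into a comprehension collecting (n_steps, y) hits followed by one grouping pass, dropping the dead y_last >= 0 guard.
import Mathlib
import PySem

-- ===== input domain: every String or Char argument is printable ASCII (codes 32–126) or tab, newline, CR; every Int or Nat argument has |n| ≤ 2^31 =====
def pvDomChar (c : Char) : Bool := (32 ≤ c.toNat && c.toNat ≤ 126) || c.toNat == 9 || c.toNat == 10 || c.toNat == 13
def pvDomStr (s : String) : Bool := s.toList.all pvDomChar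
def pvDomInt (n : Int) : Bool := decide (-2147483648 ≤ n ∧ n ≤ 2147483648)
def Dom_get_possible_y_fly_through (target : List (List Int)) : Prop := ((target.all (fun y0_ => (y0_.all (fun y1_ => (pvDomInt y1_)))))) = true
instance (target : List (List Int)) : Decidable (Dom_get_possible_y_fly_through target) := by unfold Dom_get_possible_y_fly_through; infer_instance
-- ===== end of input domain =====

-- B replaces the O(n) inner sum(range(...)) with a closed-form triangular-number difference
-- and groups (n_steps, y) hits in a separate pass (objective: faster, asymptotic).


-- ===== PORT A =====
def get_possible_y_fly_through (target : List (List Int)) : List (Int × List Int) :=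
  let t1 := PySem.List.pyGetD target 1 []
  let m := (PySem.List.min? t1 (fun x => x)).getD 0
  let y_max := -(m + 1)
  let y_min := m
  let lo := PySem.List.pyGetD t1 0 0
  let hiP1 := PySem.List.pyGetD t1 1 0 + 1   -- y_target = range(lo, hiP1); 'pos in y_target' = lo ≤ pos < hiP1
  let possible_y :=
    (PySem.List.pyRange y_min (y_max + 1) 1).foldl (fun d y =>
      (PySem.List.pyRange y_min 0 1).foldl (fun d y_last =>
        if y_last ≥ 0 then d
        else
          let n_steps := y + 1 - y_last
          let pos := (PySem.List.pyRange y_last (y + 1) 1).sum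
          if lo ≤ pos ∧ pos < hiP1 then d.modify n_steps [] (· ++ [y]) else d) d)
      (PySem.Dict.empty : PySem.Dict Int (List Int))
  possible_y.items

-- ===== PORT B =====
def pvTri (n : Int) : Int := PySem.Int.floordiv (n * (n + 1)) 2

def get_possible_y_fly_through_alt (target : List (List Int)) : List (Int × List Int) :=
  let t1 := PySem.List.pyGetD target 1 []
  let lo := PySem.List.pyGetD t1 0 0
  let hi := PySem.List.pyGetD t1 1 0
  let y_min := (PySem.List.min? t1 (fun x => x)).getD 0
  let hits := (PySem.List.pyRange y_min (-y_min) 1).flatMap (fun y =>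
    ((PySem.List.pyRange y_min 0 1).filter (fun y_last =>
        let pos := if y_last ≤ y then pvTri y - pvTri (y_last - 1) else 0
        decide (lo ≤ pos ∧ pos ≤ hi))).map (fun y_last => (y + 1 - y_last, y)))
  -- possible_y.setdefault(n_steps, []).append(y)  ≡  modify n_steps [] (· ++ [y])
  (hits.foldl (fun d p => d.modify p.1 [] (· ++ [p.2]))
      (PySem.Dict.empty : PySem.Dict Int (List Int))).items

-- ===== PRECONDITION & SPEC =====
-- Pre_ excludes inputs where Python A raises IndexError/ValueError: fewer than two rows, or a y-row with fewer than two entries.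
def Pre_get_possible_y_fly_through (target : List (List Int)) : Prop :=
  2 ≤ target.length ∧ 2 ≤ (target.getD 1 []).length
instance (target : List (List Int)) : Decidable (Pre_get_possible_y_fly_through target) := by
  unfold Pre_get_possible_y_fly_through; infer_instance
def pvWitness_get_possible_y_fly_through : List (List Int) := [[1, 3], [-4, -2]]

def Spec_get_possible_y_fly_through (target : List (List Int)) (out : List (Int × List Int)) : Prop := out = get_possible_y_fly_through_alt target
instance (target : List (List Int)) (out : List (Int × List Int)) : Decidable (Spec_get_possible_y_fly_through target out) := by unfold Spec_get_possible_y_fly_through; infer_instance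

-- ===== CLAIM (what is proved, stated in full; the proofs are below) =====
def Claim_equal_get_possible_y_fly_through : Prop := ∀ (target : List (List Int)), Dom_get_possible_y_fly_through target → Pre_get_possible_y_fly_through target → Spec_get_possible_y_fly_through target (get_possible_y_fly_through target)

-- ===== LEMMAS AND PROOFS =====

theorem pvTri_succ (m : Int) : pvTri m = pvTri (m - 1) + m := by
  obtain ⟨k, hk⟩ := Int.even_mul_succ_self m
  obtain ⟨j, hj⟩ := Int.even_mul_succ_self (m - 1)
  have hj2 : (m - 1) * m = j + j := by simpa using hj
  unfold pvTri
  rw [PySem.Int.floordiv_eq_ediv_of_pos (by omega), PySem.Int.floordiv_eq_ediv_of_pos (by omega)]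
  have e : (m - 1) * ((m - 1) + 1) = (m - 1) * m := by ring
  rw [e, hk, hj2]
  have h1 : (k + k) / 2 = k := by omega
  have h2 : (j + j) / 2 = j := by omega
  rw [h1, h2]
  ring_nf at hk hj2 ⊢
  linarith

theorem sum_pyRange_tri (a : Int) (n : Nat) :
    (PySem.List.pyRange a (a + n) 1).sum = pvTri (a + n - 1) - pvTri (a - 1) := by
  induction n with
  | zero =>
    rw [PySem.List.pyRange_one_eq_nil (by simp : a + ((0:Nat):Int) ≤ a)]
    simp
  | succ k ih =>
    have h : a + (k + 1 : Nat) = (a + k) + 1 := by push_cast; ring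
    rw [h, PySem.List.pyRange_one_succ_right (by omega : a ≤ a + (k : Nat))]
    rw [List.sum_append, ih]
    have e1 : a + (k : Int) + 1 - 1 = a + (k : Int) := by ring
    rw [e1]
    have := pvTri_succ (a + k)
    simp only [List.sum_cons, List.sum_nil]
    omega

theorem sum_pyRange_closed (a b : Int) :
    (PySem.List.pyRange a (b + 1) 1).sum =
      (if a ≤ b then pvTri b - pvTri (a - 1) else 0) := by
  split_ifs with h
  · have hn : b + 1 = a + ((b + 1 - a).toNat : Int) := by omega
    rw [hn, sum_pyRange_tri]
    have e : a + ((b + 1 - a).toNat : Int) - 1 = b := by omega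
    rw [e]
  · rw [PySem.List.pyRange_one_eq_nil (by omega)]
    simp

theorem pv_core (m lo hi : Int) :
    ((PySem.List.pyRange m (-(m + 1) + 1) 1).foldl (fun d y =>
        (PySem.List.pyRange m 0 1).foldl (fun d y_last =>
          if y_last ≥ 0 then d
          else if lo ≤ (PySem.List.pyRange y_last (y + 1) 1).sum ∧
                  (PySem.List.pyRange y_last (y + 1) 1).sum < hi + 1 then
            d.modify (y + 1 - y_last) [] (· ++ [y]) else d) d)
      (PySem.Dict.empty : PySem.Dict Int (List Int)))
    = (((PySem.List.pyRange m (-m) 1).flatMap (fun y =>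
        ((PySem.List.pyRange m 0 1).filter (fun y_last =>
            decide (lo ≤ (if y_last ≤ y then pvTri y - pvTri (y_last - 1) else 0) ∧
              (if y_last ≤ y then pvTri y - pvTri (y_last - 1) else 0) ≤ hi))).map
          (fun y_last => (y + 1 - y_last, y)))).foldl
        (fun d p => d.modify p.1 [] (· ++ [p.2]))
        (PySem.Dict.empty : PySem.Dict Int (List Int))) := by
  have hb : -(m + 1) + 1 = -m := by ring
  rw [hb, List.foldl_flatMap]
  apply PySem.List.foldl_congr_mem
  intro d y _
  rw [List.foldl_map, ← PySem.List.foldl_if_eq_foldl_filter]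
  apply PySem.List.foldl_congr_mem
  intro d' yl hyl
  have hneg : yl < 0 := (PySem.List.mem_pyRange_one.mp hyl).2
  rw [if_neg (by omega : ¬ yl ≥ 0), sum_pyRange_closed yl y]
  have hiff : (lo ≤ (if yl ≤ y then pvTri y - pvTri (yl - 1) else 0) ∧
      (if yl ≤ y then pvTri y - pvTri (yl - 1) else 0) < hi + 1) ↔
      (lo ≤ (if yl ≤ y then pvTri y - pvTri (yl - 1) else 0) ∧
      (if yl ≤ y then pvTri y - pvTri (yl - 1) else 0) ≤ hi) := by
    constructor <;> (intro h; exact ⟨h.1, by omega⟩)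
  by_cases h : lo ≤ (if yl ≤ y then pvTri y - pvTri (yl - 1) else 0) ∧
      (if yl ≤ y then pvTri y - pvTri (yl - 1) else 0) ≤ hi
  · rw [if_pos (hiff.mpr h), if_pos (by simpa using h)]
  · rw [if_neg (fun hc => h (hiff.mp hc)), if_neg (by simpa using h)]

-- ===== VERDICT (by name: the statement is the Claim_ definition above) =====
theorem get_possible_y_fly_through_spec : Claim_equal_get_possible_y_fly_through := by
  intro target _hdom _hpre
  unfold Spec_get_possible_y_fly_through
  unfold get_possible_y_fly_through get_possible_y_fly_through_alt
  dsimp only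
  exact congrArg PySem.Dict.items (pv_core _ _ _)
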